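-- pv_equiv track=rewrite | github.com/HongYeonLee/Graph-Theory-Homework | simplegraphs.py | odd_vertices
-- ===== SOURCE A (Python) =====
-- def odd_vertices(n, edges):
--     # 인접 행렬 초기화
--     adj_matrix = [[0] * n for _ in range(n)]
--
--     # 간선 정보를 인접 행렬에 반영
--     for u, v in edges:
--         adj_matrix[u][v] += 1
--         adj_matrix[v][u] += 1
--
--     # 차수가 홀수인 정점 찾기
--     result = []
--     for i in range(n):
--         degree = sum(adj_matrix[i])
--         if degree % 2 == 1:
--             result.append(i)
--
--     return result
-- ===== SOURCE B (Python) =====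
-- def odd_vertices(n, edges):
--     # One-pass degree counting: no n x n matrix, no per-vertex row sums.
--     deg = [0] * n
--     for u, v in edges:
--         deg[u] += 1
--         deg[v] += 1
--     return [i for i in range(n) if deg[i] % 2 == 1]
-- ===== Notes on version B (the rewrite author's own statement) =====
-- stated objective: faster
-- what changed: Replaces the n x n adjacency matrix and per-vertex row sums with a single length-n degree array filled in one pass over the edges.
import Mathlib
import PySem

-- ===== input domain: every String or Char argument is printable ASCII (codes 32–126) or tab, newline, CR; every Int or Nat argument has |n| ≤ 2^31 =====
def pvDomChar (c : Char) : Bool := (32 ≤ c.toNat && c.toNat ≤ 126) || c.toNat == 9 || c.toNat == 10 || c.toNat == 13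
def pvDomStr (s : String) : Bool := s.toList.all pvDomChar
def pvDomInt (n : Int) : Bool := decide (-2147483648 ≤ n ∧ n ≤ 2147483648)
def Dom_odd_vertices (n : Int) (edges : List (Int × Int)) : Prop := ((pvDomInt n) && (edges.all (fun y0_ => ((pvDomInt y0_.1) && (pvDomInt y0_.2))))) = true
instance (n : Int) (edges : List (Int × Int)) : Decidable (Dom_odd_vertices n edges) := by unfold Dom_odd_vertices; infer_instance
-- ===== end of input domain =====

-- B replaces A's n×n adjacency matrix and per-vertex row sums with a single
-- length-n degree array filled in one pass over the edges (objective: faster).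


-- ===== PORT A =====
-- Python list indexing with a possibly negative index (list length is n within Pre_)
def pvIdx (n : Int) (i : Int) : Nat := (if i < 0 then i + n else i).toNat

def odd_vertices (n : Int) (edges : List (Int × Int)) : List Int :=
  let adj : List (List Int) := List.replicate n.toNat (List.replicate n.toNat 0)
  let adj := edges.foldl (fun m e =>
    let m := m.modify (pvIdx n e.1) (fun row => row.modify (pvIdx n e.2) (· + 1))
    m.modify (pvIdx n e.2) (fun row => row.modify (pvIdx n e.1) (· + 1))) adj
  (PySem.List.pyRange 0 n 1).foldl (fun res i =>
    let degree := (adj.getD i.toNat []).foldl (· + ·) 0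
    if PySem.Int.mod degree 2 == 1 then res ++ [i] else res) []

-- ===== PORT B =====
def odd_vertices_alt (n : Int) (edges : List (Int × Int)) : List Int :=
  let deg : List Int := List.replicate n.toNat 0
  let deg := edges.foldl (fun d e =>
    (d.modify (pvIdx n e.1) (· + 1)).modify (pvIdx n e.2) (· + 1)) deg
  (PySem.List.pyRange 0 n 1).filter (fun i => PySem.Int.mod (deg.getD i.toNat 0) 2 == 1)

-- ===== PRECONDITION & SPEC =====
-- Pre_ excludes exactly the inputs on which Python A raises IndexError:
-- any edge endpoint outside the range [-n, n) of valid (possibly negative) list indices.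
def Pre_odd_vertices (n : Int) (edges : List (Int × Int)) : Prop :=
  ∀ e ∈ edges, -n ≤ e.1 ∧ e.1 < n ∧ -n ≤ e.2 ∧ e.2 < n
instance (n : Int) (edges : List (Int × Int)) : Decidable (Pre_odd_vertices n edges) := by
  unfold Pre_odd_vertices; infer_instance
def pvWitness_odd_vertices : Int × (List (Int × Int)) := (4, [(0, 1), (1, 2), (-1, 2)])

def Spec_odd_vertices (n : Int) (edges : List (Int × Int)) (out : List Int) : Prop := out = odd_vertices_alt n edges
instance (n : Int) (edges : List (Int × Int)) (out : List Int) : Decidable (Spec_odd_vertices n edges out) := by unfold Spec_odd_vertices; infer_instance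

-- ===== CLAIM (what is proved, stated in full; the proofs are below) =====
def Claim_equal_odd_vertices : Prop := ∀ (n : Int) (edges : List (Int × Int)), Dom_odd_vertices n edges → Pre_odd_vertices n edges → Spec_odd_vertices n edges (odd_vertices n edges)

-- ===== LEMMAS AND PROOFS =====

/-- Invariant linking A's matrix state with B's degree-array state. -/
def pvInv (n : Int) (m : List (List Int)) (d : List Int) : Prop :=
  m.length = n.toNat ∧ d.length = n.toNat ∧
  (∀ k, k < m.length → (m.getD k []).length = n.toNat) ∧
  (∀ k, (m.getD k []).sum = d.getD k 0)

theorem pv_getD_modify {α : Type} (l : List α) (i k : Nat) (f : α → α) (dflt : α) :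
    (l.modify i f).getD k dflt =
      if i = k ∧ k < l.length then f (l.getD k dflt) else l.getD k dflt := by
  simp only [List.getD_eq_getElem?_getD, List.getElem?_modify]
  by_cases hk : k < l.length
  · rw [List.getElem?_eq_getElem hk]
    by_cases hik : i = k <;> simp [hik, hk]
  · rw [List.getElem?_eq_none (by omega)]
    simp [hk]

theorem pv_sum_modify_add_one (row : List Int) (j : Nat) :
    (row.modify j (· + 1)).sum = row.sum + (if j < row.length then 1 else 0) := by
  induction row generalizing j with
  | nil => simp
  | cons a t ih =>
    cases j with
    | zero => simp [List.modify]; ring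
    | succ j =>
      simp only [List.modify_succ_cons, List.sum_cons, ih, List.length_cons]
      have : j < t.length ↔ j + 1 < t.length + 1 := by omega
      rw [if_congr this rfl rfl]; ring

theorem pv_idx_lt (n u : Int) (h1 : -n ≤ u) (h2 : u < n) : pvIdx n u < n.toNat := by
  unfold pvIdx; split <;> omega

theorem pv_inv_bump (n : Int) (m : List (List Int)) (d : List Int) (i j : Nat)
    (hInv : pvInv n m d) (hi : i < n.toNat) (hj : j < n.toNat) :
    pvInv n (m.modify i (fun row => row.modify j (· + 1))) (d.modify i (· + 1)) := by
  obtain ⟨hm, hd, hrow, hsum⟩ := hInv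
  refine ⟨by simp [hm], by simp [hd], ?_, ?_⟩
  · intro k hk
    rw [pv_getD_modify]
    split
    · simpa using hrow k (by simpa using hk)
    · exact hrow k (by simpa using hk)
  · intro k
    rw [pv_getD_modify, pv_getD_modify]
    by_cases hik : i = k
    · have hkm : k < m.length := by omega
      have hkd : k < d.length := by omega
      simp only [hik, hkm, hkd, and_self, if_true, true_and]
      rw [pv_sum_modify_add_one, hsum k, hrow k hkm]
      simp [hj]
    · rw [if_neg (by simp [hik]), if_neg (by simp [hik])]; exact hsum k

theorem pv_inv_foldl (n : Int) (edges : List (Int × Int)) (m : List (List Int)) (d : List Int)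
    (hInv : pvInv n m d)
    (hpre : ∀ e ∈ edges, -n ≤ e.1 ∧ e.1 < n ∧ -n ≤ e.2 ∧ e.2 < n) :
    pvInv n
      (edges.foldl (fun m e =>
        let m := m.modify (pvIdx n e.1) (fun row => row.modify (pvIdx n e.2) (· + 1))
        m.modify (pvIdx n e.2) (fun row => row.modify (pvIdx n e.1) (· + 1))) m)
      (edges.foldl (fun d e =>
        (d.modify (pvIdx n e.1) (· + 1)).modify (pvIdx n e.2) (· + 1)) d) := by
  induction edges generalizing m d with
  | nil => exact hInv
  | cons e t ih =>
    obtain ⟨h1, h2, h3, h4⟩ := hpre e (by simp)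
    refine ih _ _ ?_ (fun e he => hpre e (by simp [he]))
    exact pv_inv_bump n _ _ _ _
      (pv_inv_bump n m d _ _ hInv (pv_idx_lt n _ h1 h2) (pv_idx_lt n _ h3 h4))
      (pv_idx_lt n _ h3 h4) (pv_idx_lt n _ h1 h2)

theorem pv_inv_init (n : Int) :
    pvInv n (List.replicate n.toNat (List.replicate n.toNat 0)) (List.replicate n.toNat 0) := by
  refine ⟨by simp, by simp, ?_, ?_⟩ <;> intro k
  · intro hk; simp at hk; simp [List.getD_eq_getElem?_getD, List.getElem?_replicate, hk]
  · by_cases hk : k < n.toNat <;>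
      simp [List.getD_eq_getElem?_getD, List.getElem?_replicate, hk,
        List.getElem?_eq_none, List.length_replicate]

-- ===== VERDICT (by name: the statement is the Claim_ definition above) =====
theorem odd_vertices_spec : Claim_equal_odd_vertices := by
  intro n edges _ hpre
  unfold Spec_odd_vertices odd_vertices odd_vertices_alt
  simp only []
  have hInv := pv_inv_foldl n edges _ _ (pv_inv_init n) hpre
  obtain ⟨hm, hd, hrow, hsum⟩ := hInv
  rw [PySem.List.foldl_append_if_eq_filter]
  rw [List.nil_append]
  apply List.filter_congr
  intro i hi
  have hsum' := hsum i.toNat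
  rw [← List.sum_eq_foldl] at *
  rw [hsum']
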